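-- pv_equiv track=rewrite | github.com/pypi-data/pypi-mirror-249 | packages/spj-grader/spj_grader-0.3.4.tar.gz/spj_grader-0.3.4/src/spj_grader/spj_grader_034.py | indent_to_spaces
-- ===== SOURCE A (Python) =====
-- def indent_to_spaces(s):
--     out = ''
--     for line in s.splitlines():
--         line_lstrip = line.lstrip()
--         k = 0
--         t = ''
--         for e in line[:len(line) - len(line_lstrip)]:
--             if e == ' ':
--                 k += 1
--                 t += ' '
--             elif e == '\t':
--                 t += ' ' * (8-k)
--                 k = 0
--             else:
--                 assert False, 'unexpected other whitespace char'
--         out += t + line_lstrip + '\n'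
--     return out
-- ===== SOURCE B (Python) =====
-- def indent_to_spaces(s):
--     out = []
--     for line in s.splitlines():
--         rest = line.lstrip()
--         lead = line[:len(line) - len(rest)]
--         *init, last = lead.split('\t')
--         width = sum(max(len(chunk), 8) for chunk in init) + len(last)
--         out.append(' ' * width + rest + '\n')
--     return ''.join(out)
-- ===== Notes on version B (the rewrite author's own statement) =====
-- stated objective: simpler
-- what changed: Replaces A's per-character scan of the leading whitespace with a mutable column counter and incremental string building by splitting the lead on tabs and computing the indent width arithmetically (max(len,8) per pre-tab chunk, len for the last), emitting the spaces in one go.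
import Mathlib
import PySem

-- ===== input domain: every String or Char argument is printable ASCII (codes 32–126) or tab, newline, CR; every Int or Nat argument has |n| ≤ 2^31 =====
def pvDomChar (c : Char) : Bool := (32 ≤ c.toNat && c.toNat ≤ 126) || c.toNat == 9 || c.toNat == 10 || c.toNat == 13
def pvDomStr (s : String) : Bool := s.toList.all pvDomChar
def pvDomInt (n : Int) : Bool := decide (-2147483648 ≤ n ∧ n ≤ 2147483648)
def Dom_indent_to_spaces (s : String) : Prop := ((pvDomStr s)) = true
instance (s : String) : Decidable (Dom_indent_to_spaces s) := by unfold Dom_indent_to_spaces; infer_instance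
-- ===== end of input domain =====

-- B replaces A's per-character column-counting scan of the leading whitespace by splitting it on
-- tabs and computing the indent width arithmetically (objective: simpler decomposition, same cost).

-- ===== PORT A =====
-- Literal port of A; the inner loop's `assert False` branch is unreachable on Dom_ (the leading
-- whitespace of a splitlines line within Dom consists of spaces and tabs only); the port leaves
-- the state unchanged there.
def indent_to_spaces (s : String) : String :=
  String.ofList ((PySem.Chars.splitlines s.toList).foldl (fun out line =>
    let line_lstrip := PySem.Chars.lstrip line
    let kt := (PySem.List.slice line none
        (some ((line.length : Int) - (line_lstrip.length : Int)))).foldl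
      (fun (kt : Int × List Char) e =>
        if e = ' ' then (kt.1 + 1, kt.2 ++ [' '])
        else if e = '\t' then (0, kt.2 ++ PySem.List.pyRepeat [' '] (8 - kt.1))
        else kt)  -- Python: assert False (unreachable on Dom_)
      ((0 : Int), ([] : List Char))
    out ++ kt.2 ++ line_lstrip ++ ['\n']) [])

-- ===== PORT B =====
-- Width of the tab-separated chunks of the leading whitespace: every chunk before a tab
-- contributes max(len, 8) spaces, the final chunk contributes its own length.
def chunksWidth : List (List Char) → Nat
  | [] => 0
  | [c] => c.length
  | c :: rest => max c.length 8 + chunksWidth rest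

def indent_to_spaces_alt (s : String) : String :=
  String.ofList ((PySem.Chars.splitlines s.toList).foldl (fun out line =>
    let rest := PySem.Chars.lstrip line
    -- line[:len(line)-len(rest)]: the stop index is between 0 and len(line), so it is List.take
    let lead := line.take (line.length - rest.length)
    out ++ List.replicate (chunksWidth (lead.splitOn '\t')) ' ' ++ rest ++ ['\n']) [])

-- ===== PRECONDITION & SPEC =====
def Spec_indent_to_spaces (s : String) (out : String) : Prop := out = indent_to_spaces_alt s
instance (s : String) (out : String) : Decidable (Spec_indent_to_spaces s out) := by unfold Spec_indent_to_spaces; infer_instance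

-- ===== CLAIM (what is proved, stated in full; the proofs are below) =====
def Claim_equal_indent_to_spaces : Prop := ∀ (s : String), Dom_indent_to_spaces s → Spec_indent_to_spaces s (indent_to_spaces s)

-- ===== LEMMAS AND PROOFS =====

def tWidth : List Char → Nat → Nat
  | [], _ => 0
  | c :: xs, k =>
    if c = ' ' then 1 + tWidth xs (k + 1)
    else if c = '\t' then (8 - k) + tWidth xs 0
    else tWidth xs k

theorem foldA_eq (lead : List Char) : ∀ (k : Int) (t : List Char), 0 ≤ k →
    (lead.foldl (fun (kt : Int × List Char) e =>
        if e = ' ' then (kt.1 + 1, kt.2 ++ [' '])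
        else if e = '\t' then (0, kt.2 ++ PySem.List.pyRepeat [' '] (8 - kt.1))
        else kt) (k, t)).2 = t ++ List.replicate (tWidth lead k.toNat) ' ' := by
  induction lead with
  | nil => intro k t hk; simp [tWidth]
  | cons c xs ih =>
    intro k t hk
    by_cases hsp : c = ' '
    · subst hsp
      rw [List.foldl_cons, if_pos rfl,
        show tWidth (' ' :: xs) k.toNat = 1 + tWidth xs (k.toNat + 1) from by simp [tWidth],
        ih (k + 1) (t ++ [' ']) (by omega),
        show (k + 1).toNat = k.toNat + 1 from by omega,
        List.replicate_add]
      simp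
    · by_cases htb : c = '\t'
      · subst htb
        rw [List.foldl_cons, if_neg (by decide), if_pos rfl,
          show tWidth ('\t' :: xs) k.toNat = (8 - k.toNat) + tWidth xs 0 from by simp [tWidth],
          ih 0 (t ++ PySem.List.pyRepeat [' '] (8 - k)) (by omega),
          PySem.List.pyRepeat_singleton,
          show (8 - k).toNat = 8 - k.toNat from by omega,
          List.replicate_add]
        simp
      · rw [List.foldl_cons, if_neg hsp, if_neg htb,
          show tWidth (c :: xs) k.toNat = tWidth xs k.toNat from by simp [tWidth, hsp, htb]]
        exact ih k t hk

def chunksWidthK : List (List Char) → Nat → Nat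
  | [], _ => 0
  | [c], _ => c.length
  | c :: rest, k => (max (k + c.length) 8 - k) + chunksWidthK rest 0

theorem chunksWidthK_zero (cs : List (List Char)) : chunksWidthK cs 0 = chunksWidth cs := by
  induction cs with
  | nil => rfl
  | cons c rest ih =>
    cases rest with
    | nil => rfl
    | cons d ds =>
      simp only [chunksWidthK, chunksWidth] at *
      omega

theorem tWidth_eq_chunks : ∀ (lead : List Char), (∀ c ∈ lead, c = ' ' ∨ c = '\t') →
    ∀ k : Nat, tWidth lead k = chunksWidthK (lead.splitOn '\t') k := by
  intro lead
  induction lead with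
  | nil => intro _ k; simp [tWidth, List.splitOn, List.splitOnP_nil, chunksWidthK]
  | cons c xs ih =>
    intro h k
    have hx : ∀ c ∈ xs, c = ' ' ∨ c = '\t' := fun d hd => h d (List.mem_cons_of_mem c hd)
    have hne : List.splitOnP (fun x => x == '\t') xs ≠ [] := List.splitOnP_ne_nil _ _
    rcases h c (List.mem_cons_self) with hsp | htb
    · subst hsp
      rw [show tWidth (' ' :: xs) k = 1 + tWidth xs (k + 1) from by simp [tWidth],
        List.splitOn, List.splitOnP_cons, if_neg (by decide)]
      rcases hcs : List.splitOnP (fun x => x == '\t') xs with _ | ⟨c0, rest⟩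
      · exact absurd hcs hne
      · have := ih hx (k + 1)
        rw [List.splitOn, hcs] at this
        rw [this]
        cases rest with
        | nil => simp [chunksWidthK, List.modifyHead]; omega
        | cons d ds =>
          simp only [List.modifyHead, chunksWidthK, List.length_cons]
          omega
    · subst htb
      rw [show tWidth ('\t' :: xs) k = (8 - k) + tWidth xs 0 from by simp [tWidth],
        List.splitOn, List.splitOnP_cons, if_pos (by decide)]
      rcases hcs : List.splitOnP (fun x => x == '\t') xs with _ | ⟨c0, rest⟩
      · exact absurd hcs hne
      · have := ih hx 0
        rw [List.splitOn, hcs] at this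
        rw [this]
        simp only [chunksWidthK, List.length_nil]
        omega

theorem take_sub_lstrip (line : List Char) :
    line.take (line.length - (PySem.Chars.lstrip line).length)
      = line.takeWhile PySem.Chars.isspace := by
  have hsplit := List.takeWhile_append_dropWhile (p := PySem.Chars.isspace) (l := line)
  have hlen : line.length - (PySem.Chars.lstrip line).length
      = (line.takeWhile PySem.Chars.isspace).length := by
    have hl := congrArg List.length hsplit
    rw [List.length_append] at hl
    simp only [PySem.Chars.lstrip]
    omega
  rw [hlen]
  nth_rewrite 2 [← hsplit]
  exact List.take_left' rfl

theorem char_eq_of_toNat (c d : Char) (h : c.toNat = d.toNat) : c = d :=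
  Char.ext (UInt32.toNat_inj.mp h)

theorem dom_space_char (c : Char) (hd : pvDomChar c = true)
    (hn : c ≠ '\n') (hr : c ≠ '\r') (hw : PySem.Chars.isspace c = true) :
    c = ' ' ∨ c = '\t' := by
  simp only [pvDomChar, PySem.Chars.isspace, Bool.or_eq_true, Bool.and_eq_true,
    decide_eq_true_eq, beq_iff_eq] at hd hw
  have hn' : c.toNat ≠ 10 := fun h => hn (char_eq_of_toNat c '\n' (h.trans (by decide)))
  have hr' : c.toNat ≠ 13 := fun h => hr (char_eq_of_toNat c '\r' (h.trans (by decide)))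
  have h32 : c.toNat = 32 ∨ c.toNat = 9 := by omega
  rcases h32 with h | h
  · exact Or.inl (char_eq_of_toNat c ' ' (h.trans (by decide)))
  · exact Or.inr (char_eq_of_toNat c '\t' (h.trans (by decide)))
theorem splitlines_go_mem (isB : Char → Bool) (Q : Char → Prop)
    (x : List Char) (cur : List Char) (acc : List (List Char)) :
    (∀ c ∈ x, isB c = false → Q c) → (∀ c ∈ cur, Q c) →
    (∀ l ∈ acc, ∀ c ∈ l, Q c) →
    ∀ l ∈ PySem.Chars.splitlines.go isB x cur acc, ∀ c ∈ l, Q c := by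
  fun_induction PySem.Chars.splitlines.go isB x cur acc with
  | case1 cur acc hemp =>
    intro _ hcur hacc l hl c hc
    exact hacc l (List.mem_reverse.mp hl) c hc
  | case2 cur acc hemp =>
    intro _ hcur hacc l hl c hc
    rcases List.mem_cons.mp (List.mem_reverse.mp hl) with rfl | h
    · exact hcur c (List.mem_reverse.mp hc)
    · exact hacc l h c hc
  | case3 rest cur acc ih =>
    intro hx hcur hacc
    refine ih ?_ (by simp) ?_
    · intro c hc hb; exact hx c (by simp [hc]) hb
    · intro l hl c hc
      rcases List.mem_cons.mp hl with rfl | h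
      · exact hcur c (List.mem_reverse.mp hc)
      · exact hacc l h c hc
  | case4 c rest cur acc hne hB ih =>
    intro hx hcur hacc
    refine ih ?_ (by simp) ?_
    · intro d hd hb; exact hx d (by simp [hd]) hb
    · intro l hl d hd
      rcases List.mem_cons.mp hl with rfl | h
      · exact hcur d (List.mem_reverse.mp hd)
      · exact hacc l h d hd
  | case5 c rest cur acc hne hB ih =>
    intro hx hcur hacc
    refine ih ?_ ?_ hacc
    · intro d hd hb; exact hx d (by simp [hd]) hb
    · intro d hd
      rcases List.mem_cons.mp hd with rfl | h
      · exact hx d (by simp) (by simpa using hB)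
      · exact hcur d h

theorem splitlines_chars (s : List Char) (hs : ∀ c ∈ s, pvDomChar c = true) :
    ∀ l ∈ PySem.Chars.splitlines s, ∀ c ∈ l,
      pvDomChar c = true ∧ c ≠ '\n' ∧ c ≠ '\r' := by
  unfold PySem.Chars.splitlines
  apply splitlines_go_mem
  · intro c hc hb
    refine ⟨hs c hc, ?_, ?_⟩ <;> rintro rfl <;> simp at hb
  · intro c hc; simp at hc
  · intro l hl; simp at hl

-- ===== VERDICT (by name: the statement is the Claim_ definition above) =====
theorem indent_to_spaces_spec : Claim_equal_indent_to_spaces := by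
  intro s hdom
  unfold Spec_indent_to_spaces indent_to_spaces indent_to_spaces_alt
  have hs : ∀ c ∈ s.toList, pvDomChar c = true := fun c hc => List.all_eq_true.mp hdom c hc
  have hlines := splitlines_chars s.toList hs
  congr 1
  apply PySem.List.foldl_congr_mem
  intro out line hline
  have hle : (PySem.Chars.lstrip line).length ≤ line.length := by
    simpa [PySem.Chars.lstrip] using List.length_dropWhile_le PySem.Chars.isspace line
  have hslice : PySem.List.slice line none
      (some ((line.length : Int) - ((PySem.Chars.lstrip line).length : Int)))
      = line.take (line.length - (PySem.Chars.lstrip line).length) := by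
    rw [PySem.List.slice_to _ (by omega)]
    congr 1
    omega
  simp only [hslice]
  set lead := line.take (line.length - (PySem.Chars.lstrip line).length) with hlead
  have hleadchars : ∀ c ∈ lead, c = ' ' ∨ c = '\t' := by
    intro c hc
    rw [hlead, take_sub_lstrip] at hc
    have hw : PySem.Chars.isspace c = true := List.mem_takeWhile_imp hc
    have hmem : c ∈ line := (List.takeWhile_prefix _).subset hc
    obtain ⟨hd, hn, hr⟩ := hlines line hline c hmem
    exact dom_space_char c hd hn hr hw
  rw [foldA_eq lead 0 [] le_rfl,
    show (0 : Int).toNat = 0 from rfl,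
    tWidth_eq_chunks lead hleadchars 0, chunksWidthK_zero]
  simp
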